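-- pv_equiv track=rewrite | github.com/hyemi0622/algorithm | Week_Solutions/8Week/Problem1/nsyproblem1.py | solution
-- ===== SOURCE A (Python) =====
-- import heapq
--
-- def solution(scoville, K):
--     heapq.heapify(scoville)
--     answer = 0
--
--     while len(scoville) >= 2 and scoville[0] < K:
--         a = heapq.heappop(scoville)
--         b = heapq.heappop(scoville)
--         c = a + (b * 2)
--         heapq.heappush(scoville, c)
--         answer += 1
--     return answer if scoville[0] >= K else -1
-- ===== SOURCE B (Python) =====
-- def solution(scoville, K):
--     # Keeps one fully-sorted list instead of a heap; return-value equivalent to A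
--     # (A additionally leaves its argument reordered into a heap; B does not mutate it).
--     s = sorted(scoville)
--     answer = 0
--     while len(s) >= 2 and s[0] < K:
--         c = s[0] + 2 * s[1]
--         s = s[2:]
--         i = 0
--         while i < len(s) and s[i] <= c:
--             i += 1
--         s.insert(i, c)
--         answer += 1
--     return answer if s[0] >= K else -1
-- ===== Notes on version B (the rewrite author's own statement) =====
-- stated objective: simpler
-- what changed: Replaces the binary heap (heapq heapify/heappop/heappush) by one initial sort plus ordered re-insertion of each mixed value into a plainly sorted list; the loop reads the two smallest directly at the front.
import Mathlib
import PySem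

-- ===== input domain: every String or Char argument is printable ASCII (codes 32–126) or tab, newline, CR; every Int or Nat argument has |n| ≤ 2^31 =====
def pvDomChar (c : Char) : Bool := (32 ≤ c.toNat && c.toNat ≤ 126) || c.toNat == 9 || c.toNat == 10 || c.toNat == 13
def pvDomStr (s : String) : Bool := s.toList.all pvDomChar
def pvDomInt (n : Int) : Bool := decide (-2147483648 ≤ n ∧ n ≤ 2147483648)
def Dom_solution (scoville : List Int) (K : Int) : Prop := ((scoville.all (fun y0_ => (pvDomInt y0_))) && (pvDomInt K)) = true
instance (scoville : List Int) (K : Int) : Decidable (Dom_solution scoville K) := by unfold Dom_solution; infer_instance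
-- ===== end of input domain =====

-- B replaces A's binary heap by one initial sort plus ordered re-insertion into a sorted
-- list (objective: simpler). Equivalence is about the RETURN value only: A additionally
-- mutates its argument into a heap, B does not mutate it.

-- ===== PORT A =====
-- Literal port of A with CPython's heapq internals (_siftdown, _siftup, heapify,
-- heappop, heappush) transcribed step for step over List Int (in-place writes become
-- List.set; heap[i] reads are in-range throughout, ported as getD i 0).
def pvGet (h : List Int) (i : Nat) : Int := h.getD i 0

-- heapq._siftdown(heap, startpos, pos): bubble newitem towards the root
-- fuel only makes the loop structurally total: pos strictly decreases, so with fuel = pos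
-- fuel is never exhausted
def siftdownLoop (fuel : Nat) (newitem : Int) (startpos : Nat) (h : List Int) (pos : Nat) :
    List Int :=
  match fuel with
  | 0 => h.set pos newitem
  | fuel + 1 =>
    if startpos < pos then
      if newitem < pvGet h ((pos - 1) / 2) then
        siftdownLoop fuel newitem startpos (h.set pos (pvGet h ((pos - 1) / 2))) ((pos - 1) / 2)
      else h.set pos newitem
    else h.set pos newitem

def siftdown (h : List Int) (startpos pos : Nat) : List Int :=
  siftdownLoop pos (pvGet h pos) startpos h pos

-- the child heapq._siftup steps to: the right child when it exists and is not
-- larger than the left one, else the left child (the childpos/rightpos dance)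
def pickChild (h : List Int) (pos : Nat) : Nat :=
  if 2 * pos + 2 < h.length ∧ ¬ (pvGet h (2 * pos + 1) < pvGet h (2 * pos + 2)) then 2 * pos + 2
  else 2 * pos + 1

-- heapq._siftup(heap, pos): move the hole down to a leaf along smaller children
def siftupLoop (fuel : Nat) (h : List Int) (pos : Nat) : List Int × Nat :=
  match fuel with
  | 0 => (h, pos)
  | fuel + 1 =>
    if 2 * pos + 1 < h.length then
      siftupLoop fuel (h.set pos (pvGet h (pickChild h pos))) (pickChild h pos)
    else (h, pos)

def siftup (h : List Int) (pos : Nat) : List Int :=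
  siftdown ((siftupLoop h.length h pos).1.set (siftupLoop h.length h pos).2 (pvGet h pos))
    pos (siftupLoop h.length h pos).2

-- heapify: for i in reversed(range(n//2)): _siftup(heap, i)
def heapifyFrom (h : List Int) : Nat → List Int
  | 0 => h
  | i + 1 => heapifyFrom (siftup h i) i

def heapify (h : List Int) : List Int := heapifyFrom h (h.length / 2)

def heappop (h : List Int) : Int × List Int :=
  if h.dropLast.isEmpty then (pvGet h (h.length - 1), h.dropLast)
  else (pvGet h.dropLast 0, siftup (h.dropLast.set 0 (pvGet h (h.length - 1))) 0)

def heappush (h : List Int) (item : Int) : List Int :=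
  siftdown (h ++ [item]) 0 h.length

def loopA (fuel : Nat) (K : Int) (h : List Int) (ans : Int) : Int × List Int :=
  match fuel with
  | 0 => (ans, h)
  | fuel + 1 =>
    if 2 ≤ h.length ∧ pvGet h 0 < K then
      loopA fuel K (heappush (heappop (heappop h).2).2
        ((heappop h).1 + (heappop (heappop h).2).1 * 2)) (ans + 1)
    else (ans, h)

def solution (scoville : List Int) (K : Int) : Int :=
  if pvGet (loopA (heapify scoville).length K (heapify scoville) 0).2 0 ≥ K then
    (loopA (heapify scoville).length K (heapify scoville) 0).1
  else -1

-- ===== PORT B =====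
-- Source B: sort once; while the smallest (front) is below K, mix the two front
-- elements and re-insert the mix at its ordered position (found by a linear scan
-- past the elements ≤ c, as in Source B's inner while loop).
def insPos (l : List Int) (c : Int) : Nat :=
  match l with
  | [] => 0
  | x :: t => if x ≤ c then insPos t c + 1 else 0

def loopB (fuel : Nat) (K : Int) (s : List Int) (ans : Int) : Int × List Int :=
  match fuel with
  | 0 => (ans, s)
  | fuel + 1 =>
    if 2 ≤ s.length ∧ pvGet s 0 < K then
      loopB fuel K ((s.drop 2).insertIdx (insPos (s.drop 2) (pvGet s 0 + 2 * pvGet s 1))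
        (pvGet s 0 + 2 * pvGet s 1)) (ans + 1)
    else (ans, s)

def solution_alt (scoville : List Int) (K : Int) : Int :=
  if pvGet (loopB (PySem.List.sorted scoville (fun x => x) false).length K
      (PySem.List.sorted scoville (fun x => x) false) 0).2 0 ≥ K then
    (loopB (PySem.List.sorted scoville (fun x => x) false).length K
      (PySem.List.sorted scoville (fun x => x) false) 0).1
  else -1

-- ===== PRECONDITION & SPEC =====
-- Pre_ excludes exactly the empty list, on which A (and B) raise IndexError at the
-- final scoville[0].
def Pre_solution (scoville : List Int) (K : Int) : Prop := scoville ≠ []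
instance (scoville : List Int) (K : Int) : Decidable (Pre_solution scoville K) := by
  unfold Pre_solution; infer_instance

def pvWitness_solution : List Int × Int := ([1, 2, 3, 9, 10, 12], 7)

def Spec_solution (scoville : List Int) (K : Int) (out : Int) : Prop := out = solution_alt scoville K
instance (scoville : List Int) (K : Int) (out : Int) : Decidable (Spec_solution scoville K out) := by unfold Spec_solution; infer_instance

-- ===== CLAIM (what is proved, stated in full; the proofs are below) =====
def Claim_equal_solution : Prop := ∀ (scoville : List Int) (K : Int), Dom_solution scoville K → Pre_solution scoville K → Spec_solution scoville K (solution scoville K)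

-- ===== LEMMAS AND PROOFS =====

-- the heap-order predicate: every parent/child pair with parent index ≥ s is ordered
def IsHeapFrom (h : List Int) (s : Nat) : Prop :=
  ∀ i j : Nat, s ≤ i → j < h.length → (j = 2 * i + 1 ∨ j = 2 * i + 2) → pvGet h i ≤ pvGet h j

-- pos lies on a downward (child) path from s
def Desc (s : Nat) (pos : Nat) : Prop :=
  if pos ≤ s then pos = s else Desc s ((pos - 1) / 2)
termination_by pos
decreasing_by omega

theorem desc_self (s : Nat) : Desc s s := by unfold Desc; simp

theorem desc_le (s : Nat) : ∀ pos, Desc s pos → s ≤ pos := by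
  intro pos
  unfold Desc
  split <;> omega

theorem desc_parent (s pos : Nat) (hd : Desc s pos) (hs : s < pos) :
    Desc s ((pos - 1) / 2) := by
  rw [Desc] at hd
  rw [if_neg (by omega)] at hd
  exact hd

theorem desc_child (s pos j : Nat) (hd : Desc s pos) (hj : j = 2 * pos + 1 ∨ j = 2 * pos + 2) :
    Desc s j := by
  have hps : s ≤ pos := desc_le s pos hd
  rw [Desc, if_neg (by omega)]
  have : (j - 1) / 2 = pos := by omega
  rw [this]; exact hd

theorem desc_zero : ∀ pos, Desc 0 pos := by
  intro pos
  induction pos using Nat.strong_induction_on with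
  | _ pos ih =>
    rw [Desc]
    split
    · omega
    · exact ih _ (by omega)

theorem pvGet_eq (l : List Int) (i : Nat) (h : i < l.length) : pvGet l i = l[i] :=
  List.getD_eq_getElem _ _ h

theorem pvGet_set (l : List Int) (i j : Nat) (x : Int) (hj : j < l.length) :
    pvGet (l.set i x) j = if i = j then x else pvGet l j := by
  by_cases e : i = j
  · subst e
    rw [pvGet_eq _ _ (by simpa using hj)]
    simp
  · rw [pvGet_eq _ _ (by simpa using hj), pvGet_eq _ _ hj]
    simp [e]

theorem set_set_perm (l : List Int) (i j : Nat) (hi : i < l.length) (hj : j < l.length) :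
    ((l.set i (pvGet l j)).set j (pvGet l i)).Perm l := by
  have h1 : i < l.toArray.size := by simpa
  have h2 : j < l.toArray.size := by simpa
  have hs := Array.swap_perm h1 h2
  rw [Array.perm_iff_toList_perm] at hs
  rw [pvGet_eq _ _ hi, pvGet_eq _ _ hj]
  simpa [Array.swap] using hs

-- writing v = h[q] into pos and then x into q is, up to permutation, writing x into pos
theorem set_swap_perm (h : List Int) (pos q : Nat) (x v : Int)
    (hpos : pos < h.length) (hq : q < h.length) (hne : q ≠ pos) (hv : v = pvGet h q) :
    ((h.set pos v).set q x).Perm (h.set pos x) := by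
  have e1 : pvGet (h.set pos x) q = pvGet h q := by
    rw [pvGet_set _ _ _ _ hq, if_neg (fun e => hne e.symm)]
  have e2 : pvGet (h.set pos x) pos = x := by
    rw [pvGet_set _ _ _ _ hpos, if_pos rfl]
  have : (h.set pos v).set q x
      = ((h.set pos x).set pos (pvGet (h.set pos x) q)).set q (pvGet (h.set pos x) pos) := by
    rw [e1, e2, List.set_set, hv]
  rw [this]
  exact set_set_perm _ _ _ (by simpa using hpos) (by simpa using hq)

theorem siftdownLoop_length (newitem : Int) (st : Nat) :
    ∀ (fuel : Nat) (h : List Int) (pos : Nat),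
    (siftdownLoop fuel newitem st h pos).length = h.length := by
  intro fuel
  induction fuel with
  | zero => intro h pos; simp [siftdownLoop]
  | succ fuel ih =>
    intro h pos
    simp only [siftdownLoop]
    split
    · split
      · rw [ih]; simp
      · simp
    · simp

theorem siftupLoop_length : ∀ (fuel : Nat) (h : List Int) (pos : Nat),
    (siftupLoop fuel h pos).1.length = h.length := by
  intro fuel
  induction fuel with
  | zero => intro h pos; rfl
  | succ fuel ih =>
    intro h pos
    simp only [siftupLoop]
    split
    · rw [ih]; simp
    · rfl

theorem siftup_length (h : List Int) (pos : Nat) : (siftup h pos).length = h.length := by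
  unfold siftup siftdown
  rw [siftdownLoop_length]
  simp [siftupLoop_length]

theorem heappop_length (h : List Int) : (heappop h).2.length = h.length - 1 := by
  unfold heappop
  split
  · simp
  · simp [siftup_length]

theorem heappush_length (h : List Int) (x : Int) :
    (heappush h x).length = h.length + 1 := by
  unfold heappush siftdown
  rw [siftdownLoop_length]
  simp

-- exiting _siftdown: writing newitem at the hole yields a heap from s
theorem siftdown_exit (newitem : Int) (s pos : Nat) (h : List Int)
    (hb : ∀ i j, s ≤ i → j < h.length → (j = 2 * i + 1 ∨ j = 2 * i + 2) → j ≠ pos →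
      pvGet h i ≤ pvGet h j)
    (hc1 : ∀ j, j < h.length → (j = 2 * pos + 1 ∨ j = 2 * pos + 2) → newitem ≤ pvGet h j)
    (hstop : s < pos → pvGet h ((pos - 1) / 2) ≤ newitem) :
    IsHeapFrom (h.set pos newitem) s := by
  intro i j hi hj hpair
  have hj' : j < h.length := by simpa using hj
  have hij : i < j := by omega
  have hi' : i < h.length := by omega
  rw [pvGet_set _ _ _ _ hj', pvGet_set _ _ _ _ hi']
  by_cases ej : pos = j
  · subst ej
    have hip : i = (pos - 1) / 2 := by omega
    rw [if_pos rfl, if_neg (by omega)]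
    subst hip
    exact hstop (by omega)
  · rw [if_neg ej]
    by_cases ei : pos = i
    · subst ei
      rw [if_pos rfl]
      exact hc1 j hj' hpair
    · rw [if_neg ei]
      exact hb i j hi hj' hpair (fun e => ej (by omega))

theorem siftdownLoop_spec (newitem : Int) (s : Nat) :
    ∀ (fuel : Nat) (pos : Nat) (h : List Int), pos ≤ fuel → Desc s pos → pos < h.length →
    (∀ i j, s ≤ i → j < h.length → (j = 2 * i + 1 ∨ j = 2 * i + 2) → j ≠ pos →
      pvGet h i ≤ pvGet h j) →
    (∀ j, j < h.length → (j = 2 * pos + 1 ∨ j = 2 * pos + 2) → newitem ≤ pvGet h j) →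
    (s < pos → ∀ j, j < h.length → (j = 2 * pos + 1 ∨ j = 2 * pos + 2) →
      pvGet h ((pos - 1) / 2) ≤ pvGet h j) →
    (siftdownLoop fuel newitem s h pos).Perm (h.set pos newitem) ∧
    IsHeapFrom (siftdownLoop fuel newitem s h pos) s := by
  intro fuel
  induction fuel with
  | zero =>
    intro pos h hf hdesc hlt hb hc1 hc2
    have hp0 : pos = 0 := by omega
    subst hp0
    simp only [siftdownLoop]
    exact ⟨List.Perm.refl _,
      siftdown_exit newitem s 0 h hb hc1 (fun hc => absurd hc (by omega))⟩
  | succ fuel ih =>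
    intro pos h hf hdesc hlt hb hc1 hc2
    simp only [siftdownLoop]
    by_cases hsp : s < pos
    · rw [if_pos hsp]
      have hpos1 : 1 ≤ pos := by omega
      have hppd : Desc s ((pos - 1) / 2) := desc_parent s pos hdesc hsp
      have hpps : s ≤ (pos - 1) / 2 := desc_le s _ hppd
      have hpplt : (pos - 1) / 2 < h.length := by omega
      by_cases hni : newitem < pvGet h ((pos - 1) / 2)
      · rw [if_pos hni]
        obtain ⟨hperm, hheap⟩ :=
          ih ((pos - 1) / 2) (h.set pos (pvGet h ((pos - 1) / 2))) (by omega) hppd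
            (by simpa using hpplt)
            (by
              -- pairs with child ≠ parent hole, over the shifted array
              intro i j hi hj hpair hjp
              have hj' : j < h.length := by simpa using hj
              have hi' : i < h.length := by omega
              rw [pvGet_set _ _ _ _ hj', pvGet_set _ _ _ _ hi']
              by_cases ej : pos = j
              · subst ej
                have : i = (pos - 1) / 2 := by omega
                subst this
                rw [if_pos rfl, if_neg (by omega)]
              · rw [if_neg ej]
                by_cases ei : pos = i
                · subst ei
                  rw [if_pos rfl]
                  exact hc2 hsp j hj' hpair
                · rw [if_neg ei]
                  exact hb i j hi hj' hpair (fun e => ej (by omega)))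
            (by
              -- newitem is below both children of the new hole
              intro j hj hpair
              have hj' : j < h.length := by simpa using hj
              have hposch : pos = 2 * ((pos - 1) / 2) + 1 ∨ pos = 2 * ((pos - 1) / 2) + 2 := by
                omega
              rw [pvGet_set _ _ _ _ hj']
              by_cases ej : pos = j
              · rw [if_pos ej]
                exact le_of_lt hni
              · rw [if_neg ej]
                calc newitem ≤ pvGet h ((pos - 1) / 2) := le_of_lt hni
                  _ ≤ pvGet h j := hb ((pos - 1) / 2) j hpps hj' hpair (fun e => ej e.symm))
            (by
              -- grandparent property for the new hole
              intro hspp j hj hpair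
              have hj' : j < h.length := by simpa using hj
              have hq : (((pos - 1) / 2) - 1) / 2 < h.length := by omega
              have hqd : Desc s ((((pos - 1) / 2) - 1) / 2) :=
                desc_parent s _ hppd hspp
              have hqs : s ≤ (((pos - 1) / 2) - 1) / 2 := desc_le s _ hqd
              have hqpair : (pos - 1) / 2 = 2 * ((((pos - 1) / 2) - 1) / 2) + 1 ∨
                  (pos - 1) / 2 = 2 * ((((pos - 1) / 2) - 1) / 2) + 2 := by omega
              have hqp : pvGet h ((((pos - 1) / 2) - 1) / 2) ≤ pvGet h ((pos - 1) / 2) :=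
                hb _ _ hqs hpplt hqpair (by omega)
              rw [pvGet_set _ _ _ _ hj', pvGet_set _ _ _ _ hq,
                if_neg (show ¬ pos = (((pos - 1) / 2) - 1) / 2 by omega)]
              by_cases ej : pos = j
              · rw [if_pos ej]
                exact hqp
              · rw [if_neg ej]
                calc pvGet h ((((pos - 1) / 2) - 1) / 2) ≤ pvGet h ((pos - 1) / 2) := hqp
                  _ ≤ pvGet h j := hb _ _ hpps hj' hpair (fun e => ej e.symm))
        refine ⟨hperm.trans ?_, hheap⟩
        exact set_swap_perm h pos ((pos - 1) / 2) newitem _ hlt hpplt (by omega) rfl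
      · rw [if_neg hni]
        exact ⟨List.Perm.refl _,
          siftdown_exit newitem s pos h hb hc1 (fun _ => le_of_not_gt hni)⟩
    · rw [if_neg hsp]
      refine ⟨List.Perm.refl _,
        siftdown_exit newitem s pos h hb hc1 (fun hc => absurd hc hsp)⟩

-- which child pickChild picks, and that it is the smaller one
theorem pickChild_mem (h : List Int) (pos : Nat) (hc : 2 * pos + 1 < h.length) :
    (pickChild h pos = 2 * pos + 1 ∨ pickChild h pos = 2 * pos + 2) ∧
    pickChild h pos < h.length := by
  unfold pickChild
  split <;> simp_all

theorem pickChild_min (h : List Int) (pos : Nat) (_hc : 2 * pos + 1 < h.length) :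
    ∀ j, j < h.length → (j = 2 * pos + 1 ∨ j = 2 * pos + 2) →
    pvGet h (pickChild h pos) ≤ pvGet h j := by
  intro j hj hpair
  unfold pickChild
  split
  · rename_i hcond
    rcases hpair with e | e <;> subst e
    · exact le_of_not_gt hcond.2
    · exact le_refl _
  · rename_i hcond
    rcases hpair with e | e <;> subst e
    · exact le_refl _
    · rcases not_and_or.mp hcond with hlt2 | hlt2
      · omega
      · exact le_of_lt (not_not.mp hlt2)

theorem siftupLoop_spec (s : Nat) :
    ∀ (fuel : Nat) (pos : Nat) (h : List Int), h.length ≤ fuel + pos → Desc s pos →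
    pos < h.length →
    (∀ i j, s ≤ i → j < h.length → (j = 2 * i + 1 ∨ j = 2 * i + 2) → j ≠ pos → i ≠ pos →
      pvGet h i ≤ pvGet h j) →
    (s < pos → ∀ j, j < h.length → (j = 2 * pos + 1 ∨ j = 2 * pos + 2) →
      pvGet h ((pos - 1) / 2) ≤ pvGet h j) →
    Desc s (siftupLoop fuel h pos).2 ∧ (siftupLoop fuel h pos).2 < h.length ∧
    ¬ (2 * (siftupLoop fuel h pos).2 + 1 < h.length) ∧
    (∀ x, ((siftupLoop fuel h pos).1.set (siftupLoop fuel h pos).2 x).Perm (h.set pos x)) ∧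
    (∀ i j, s ≤ i → j < h.length → (j = 2 * i + 1 ∨ j = 2 * i + 2) →
      j ≠ (siftupLoop fuel h pos).2 → i ≠ (siftupLoop fuel h pos).2 →
      pvGet (siftupLoop fuel h pos).1 i ≤ pvGet (siftupLoop fuel h pos).1 j) := by
  intro fuel
  induction fuel with
  | zero =>
    intro pos h hk hdesc hlt hb hc2
    omega
  | succ fuel ih =>
    intro pos h hk hdesc hlt hb hc2
    simp only [siftupLoop]
    by_cases hc : 2 * pos + 1 < h.length
    · rw [if_pos hc]
      obtain ⟨hcmem, hclt⟩ := pickChild_mem h pos hc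
      have hmin := pickChild_min h pos hc
      have hposc : pos < pickChild h pos := by omega
      have hdc : Desc s (pickChild h pos) := desc_child s pos _ hdesc hcmem
      have hlset : (h.set pos (pvGet h (pickChild h pos))).length = h.length := by simp
      obtain ⟨d1, d2, d3, d4, d5⟩ :=
        ih (pickChild h pos)
          (h.set pos (pvGet h (pickChild h pos))) (by omega) hdc (by omega)
          (by
            intro i j hi hj hpair hjc hic
            rw [hlset] at hj
            have hi2 : i < h.length := by omega
            rw [pvGet_set _ _ _ _ hj, pvGet_set _ _ _ _ hi2]
            by_cases ej : pos = j
            · subst ej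
              have hip : i = (pos - 1) / 2 := by omega
              rw [if_pos rfl, if_neg (by omega)]
              subst hip
              by_cases hsp : s < pos
              · exact hc2 hsp _ hclt hcmem
              · omega
            · rw [if_neg ej]
              by_cases ei : pos = i
              · subst ei
                rw [if_pos rfl]
                exact hmin j hj hpair
              · rw [if_neg ei]
                exact hb i j hi hj hpair (fun e => ej (by omega)) (fun e => ei (by omega)))
          (by
            intro _ j hj hpair
            rw [hlset] at hj
            have hpc : ((pickChild h pos) - 1) / 2 = pos := by omega
            rw [hpc]
            have hjpos : j ≠ pos := by omega
            rw [pvGet_set _ _ _ _ hj, pvGet_set _ _ _ _ (show pos < h.length by omega),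
              if_pos rfl, if_neg (fun e => hjpos e.symm)]
            exact hb (pickChild h pos) j (by omega) hj hpair (fun e => hjpos (by omega))
              (by omega))
      rw [hlset] at d2 d3
      refine ⟨d1, by omega, d3, ?_, ?_⟩
      · intro x
        refine (d4 x).trans ?_
        exact set_swap_perm h pos (pickChild h pos) x _ hlt hclt (by omega) rfl
      · intro i j hi hj hpair hjr hir
        exact d5 i j hi (by omega) hpair hjr hir
    · rw [if_neg hc]
      exact ⟨hdesc, hlt, hc, fun x => List.Perm.refl _, hb⟩

theorem siftup_spec (h : List Int) (pos : Nat) (hpos : pos < h.length)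
    (hH : IsHeapFrom h (pos + 1)) :
    (siftup h pos).Perm h ∧ IsHeapFrom (siftup h pos) pos := by
  obtain ⟨d1, d2, d3, d4, d5⟩ :=
    siftupLoop_spec pos h.length pos h (by omega) (desc_self pos) hpos
      (fun i j hi hj hpair _ hine => hH i j (by omega) hj hpair)
      (fun hsp => absurd hsp (lt_irrefl pos))
  have hlen1 : (siftupLoop h.length h pos).1.length = h.length := siftupLoop_length h.length h pos
  unfold siftup siftdown
  have hget : pvGet ((siftupLoop h.length h pos).1.set (siftupLoop h.length h pos).2 (pvGet h pos))
      (siftupLoop h.length h pos).2 = pvGet h pos := by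
    rw [pvGet_set _ _ _ _ (by omega), if_pos rfl]
  rw [hget]
  obtain ⟨hperm, hheap⟩ :=
    siftdownLoop_spec (pvGet h pos) pos (siftupLoop h.length h pos).2
      (siftupLoop h.length h pos).2
      ((siftupLoop h.length h pos).1.set (siftupLoop h.length h pos).2 (pvGet h pos))
      (le_refl _) d1 (by simp; omega)
      (by
        intro i j hi hj hpair hjr
        have hjl : j < h.length := by simpa [hlen1] using hj
        have hir : i ≠ (siftupLoop h.length h pos).2 := by omega
        rw [pvGet_set _ _ _ _ (by omega : i < (siftupLoop h.length h pos).1.length),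
          pvGet_set _ _ _ _ (by omega : j < (siftupLoop h.length h pos).1.length),
          if_neg (fun e => hir e.symm), if_neg (fun e => hjr e.symm)]
        exact d5 i j hi hjl hpair hjr hir)
      (fun j hj hpair => absurd (by simpa [hlen1] using hj : j < h.length) (by omega))
      (fun _ j hj hpair => absurd (by simpa [hlen1] using hj : j < h.length) (by omega))
  refine ⟨?_, hheap⟩
  refine hperm.trans ?_
  rw [List.set_set]
  refine (d4 (pvGet h pos)).trans ?_
  rw [pvGet_eq _ _ hpos, List.set_getElem_self]

theorem heapifyFrom_spec : ∀ (i : Nat) (h : List Int), i ≤ h.length → IsHeapFrom h i →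
    (heapifyFrom h i).Perm h ∧ IsHeapFrom (heapifyFrom h i) 0 := by
  intro i
  induction i with
  | zero => exact fun h _ hH => ⟨List.Perm.refl _, hH⟩
  | succ i ih =>
    intro h hi hH
    obtain ⟨hperm, hheap⟩ := siftup_spec h i (by omega) hH
    have hlen : (siftup h i).length = h.length := siftup_length h i
    obtain ⟨p, q⟩ := ih (siftup h i) (by omega) hheap
    exact ⟨p.trans hperm, q⟩

theorem heapify_spec (h : List Int) : (heapify h).Perm h ∧ IsHeapFrom (heapify h) 0 := by
  refine heapifyFrom_spec (h.length / 2) h (by omega) ?_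
  intro i j hi hj hpair
  omega

theorem heap_head_le (h : List Int) (hH : IsHeapFrom h 0) :
    ∀ x ∈ h, pvGet h 0 ≤ x := by
  have hidx : ∀ i, i < h.length → pvGet h 0 ≤ pvGet h i := by
    intro i
    induction i using Nat.strong_induction_on with
    | _ i ihi =>
      intro hi
      by_cases h0 : i = 0
      · subst h0; exact le_refl _
      · exact le_trans (ihi ((i - 1) / 2) (by omega) (by omega))
          (hH ((i - 1) / 2) i (Nat.zero_le _) hi (by omega))
  intro x hx
  obtain ⟨i, hi, rfl⟩ := List.mem_iff_getElem.mp hx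
  rw [← pvGet_eq _ _ hi]
  exact hidx i hi

theorem heappop_spec (h : List Int) (hne : h ≠ []) (hH : IsHeapFrom h 0) :
    (heappop h).1 = pvGet h 0 ∧ IsHeapFrom (heappop h).2 0 ∧
    h.Perm ((heappop h).1 :: (heappop h).2) := by
  rcases List.eq_nil_or_concat h with rfl | ⟨g, last, rfl⟩
  · exact absurd rfl hne
  · rw [List.concat_eq_append] at *
    unfold heappop
    rw [List.dropLast_concat]
    have hlast : pvGet (g ++ [last]) ((g ++ [last]).length - 1) = last := by
      rw [pvGet_eq _ _ (by simp)]
      simp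
    cases g with
    | nil =>
      simp only [List.isEmpty_nil]
      refine ⟨by simp [pvGet], ?_, by simp [pvGet]⟩
      intro i j _ hj _
      simp at hj
    | cons g0 t =>
      rw [if_neg (by simp : ¬ ((g0 :: t).isEmpty = true))]
      have hset : (g0 :: t).set 0 (pvGet ((g0 :: t) ++ [last]) (((g0 :: t) ++ [last]).length - 1))
          = last :: t := by rw [hlast, List.set_cons_zero]
      rw [hset]
      have hvals : ∀ k, 1 ≤ k → k < t.length + 1 →
          pvGet (last :: t) k = pvGet ((g0 :: t) ++ [last]) k := by
        intro k h1 h2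
        rw [pvGet_eq _ _ (by simp only [List.length_cons]; omega),
          pvGet_eq _ _ (by simp only [List.cons_append, List.length_cons,
            List.length_append, List.length_nil]; omega)]
        rw [List.getElem_append_left (by simp only [List.length_cons]; omega)]
        cases k with
        | zero => omega
        | succ k => simp
      obtain ⟨hperm, hheap⟩ := siftup_spec (last :: t) 0 (by simp) (by
        intro i j hi hj hpair
        simp only [List.length_cons] at hj
        rw [hvals i (by omega) (by omega), hvals j (by omega) (by omega)]
        exact hH i j (Nat.zero_le _) (by simp only [List.cons_append, List.length_cons,
          List.length_append, List.length_nil]; omega) hpair)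
      refine ⟨by simp [pvGet], hheap, ?_⟩
      have h1 : ((g0 :: t) ++ [last]).Perm (g0 :: (last :: t)) := by
        simp only [List.cons_append]
        exact (List.perm_append_singleton last t).cons g0
      refine h1.trans ?_
      have hg0 : pvGet (g0 :: t) 0 = g0 := by simp [pvGet]
      rw [hg0]
      exact (hperm.symm.cons g0)

theorem heappush_spec (h : List Int) (x : Int) (hH : IsHeapFrom h 0) :
    IsHeapFrom (heappush h x) 0 ∧ (heappush h x).Perm (x :: h) := by
  unfold heappush siftdown
  have hx : pvGet (h ++ [x]) h.length = x := by
    rw [pvGet_eq _ _ (by simp)]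
    simp
  rw [hx]
  obtain ⟨hperm, hheap⟩ :=
    siftdownLoop_spec x 0 h.length h.length (h ++ [x]) (le_refl _) (desc_zero h.length)
      (by simp)
      (by
        intro i j hi hj hpair hjn
        simp only [List.length_append, List.length_cons, List.length_nil] at hj
        have hjl : j < h.length := by omega
        have hil : i < h.length := by omega
        rw [pvGet_eq _ _ (by simp; omega), pvGet_eq _ _ (by simp; omega),
          List.getElem_append_left hjl, List.getElem_append_left hil]
        rw [← pvGet_eq _ _ hjl, ← pvGet_eq _ _ hil]
        exact hH i j (Nat.zero_le _) hjl hpair)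
      (by intro j hj hpair; simp at hj; omega)
      (by intro hn j hj hpair; simp at hj; omega)
  refine ⟨hheap, ?_⟩
  refine hperm.trans ?_
  have hid : (h ++ [x]).set h.length x = h ++ [x] := by
    simp
  rw [hid]
  exact List.perm_append_singleton x h

theorem sorted_head_le (l : List Int) (hs : l.Pairwise (· ≤ ·)) :
    ∀ x ∈ l, pvGet l 0 ≤ x := by
  cases l with
  | nil => intro x hx; exact absurd hx (by simp)
  | cons a t =>
    intro x hx
    rcases List.mem_cons.mp hx with rfl | hx2
    · exact le_refl _
    · exact (List.pairwise_cons.mp hs).1 x hx2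

-- the least element of a multiset is determined: fronts of a heap and of a sorted
-- permutation of it agree
theorem min_unique (h l : List Int) (hp : h.Perm l) (hne : h ≠ [])
    (h1 : ∀ x ∈ h, pvGet h 0 ≤ x) (h2 : ∀ x ∈ l, pvGet l 0 ≤ x) :
    pvGet h 0 = pvGet l 0 := by
  have hnel : l ≠ [] := fun e => hne ((e ▸ hp : h.Perm []).eq_nil)
  have m1 : pvGet h 0 ∈ h := by
    cases h with
    | nil => exact absurd rfl hne
    | cons a t => simp [pvGet]
  have m2 : pvGet l 0 ∈ l := by
    cases l with
    | nil => exact absurd rfl hnel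
    | cons a t => simp [pvGet]
  exact le_antisymm (h1 _ (hp.mem_iff.mpr m2)) (h2 _ (hp.mem_iff.mp m1))

theorem insPos_le (c : Int) : ∀ (l : List Int), insPos l c ≤ l.length := by
  intro l
  induction l with
  | nil => simp [insPos]
  | cons x t ih => simp only [insPos]; split <;> simp [ih]

theorem insort_perm (l : List Int) (c : Int) :
    (l.insertIdx (insPos l c) c).Perm (c :: l) :=
  List.perm_insertIdx c l (insPos_le c l)

theorem insort_pairwise (c : Int) : ∀ (l : List Int), l.Pairwise (· ≤ ·) →
    (l.insertIdx (insPos l c) c).Pairwise (· ≤ ·) := by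
  intro l
  induction l with
  | nil => intro _; simp [insPos]
  | cons x t ih =>
    intro hs
    obtain ⟨hx, ht⟩ := List.pairwise_cons.mp hs
    simp only [insPos]
    split
    · rename_i hxc
      rw [List.insertIdx_succ_cons]
      refine List.pairwise_cons.mpr ⟨?_, ih ht⟩
      intro y hy
      rcases List.mem_cons.mp ((insort_perm t c).mem_iff.mp hy) with rfl | hy2
      · exact hxc
      · exact hx y hy2
    · rename_i hxc
      rw [List.insertIdx_zero]
      refine List.pairwise_cons.mpr ⟨?_, hs⟩
      intro y hy
      rcases List.mem_cons.mp hy with rfl | hy2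
      · exact le_of_lt (lt_of_not_ge hxc)
      · exact le_trans (le_of_lt (lt_of_not_ge hxc)) (hx y hy2)

theorem loopA_exit (fuel : Nat) (K : Int) (h : List Int) (ans : Int)
    (hc : ¬ (2 ≤ h.length ∧ pvGet h 0 < K)) : loopA fuel K h ans = (ans, h) := by
  cases fuel with
  | zero => rfl
  | succ fuel => simp only [loopA]; rw [if_neg hc]

theorem loopB_exit (fuel : Nat) (K : Int) (l : List Int) (ans : Int)
    (hc : ¬ (2 ≤ l.length ∧ pvGet l 0 < K)) : loopB fuel K l ans = (ans, l) := by
  cases fuel with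
  | zero => rfl
  | succ fuel => simp only [loopB]; rw [if_neg hc]

theorem loop_eq (K : Int) : ∀ (fa fb : Nat) (h l : List Int) (ans : Int),
    h.length ≤ fa → l.length ≤ fb →
    IsHeapFrom h 0 → l.Pairwise (· ≤ ·) → h.Perm l → h ≠ [] →
    (loopA fa K h ans).1 = (loopB fb K l ans).1 ∧
    (loopA fa K h ans).2.Perm (loopB fb K l ans).2 ∧
    IsHeapFrom (loopA fa K h ans).2 0 ∧ (loopB fb K l ans).2.Pairwise (· ≤ ·) ∧
    (loopA fa K h ans).2 ≠ [] := by
  intro fa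
  induction fa with
  | zero =>
    intro fb h l ans hfa hfb hH hs hp hne
    have hcA : ¬ (2 ≤ h.length ∧ pvGet h 0 < K) := by omega
    have hcB : ¬ (2 ≤ l.length ∧ pvGet l 0 < K) := by
      have := hp.length_eq
      omega
    rw [loopA_exit _ _ _ _ hcA, loopB_exit _ _ _ _ hcB]
    exact ⟨rfl, hp, hH, hs, hne⟩
  | succ fa ih =>
    intro fb h l ans hfa hfb hH hs hp hne
    have hlen : h.length = l.length := hp.length_eq
    have heads : pvGet h 0 = pvGet l 0 :=
      min_unique h l hp hne (heap_head_le h hH) (sorted_head_le l hs)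
    have hiff : (2 ≤ h.length ∧ pvGet h 0 < K) ↔ (2 ≤ l.length ∧ pvGet l 0 < K) := by
      rw [hlen, heads]
    by_cases hcond : 2 ≤ h.length ∧ pvGet h 0 < K
    · obtain ⟨hl2, _⟩ := hiff.mp hcond
      cases fb with
      | zero => omega
      | succ fb =>
        simp only [loopA, loopB]
        rw [if_pos hcond, if_pos (hiff.mp hcond)]
        obtain ⟨e1, hH1, hp1⟩ := heappop_spec h hne hH
        have hlen1 : (heappop h).2.length = h.length - 1 := heappop_length h
        have hne1 : (heappop h).2 ≠ [] := by
          intro e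
          rw [e] at hlen1
          simp at hlen1
          omega
        obtain ⟨e2, hH2, hp2⟩ := heappop_spec _ hne1 hH1
        have hlen2 : (heappop (heappop h).2).2.length = h.length - 2 := by
          rw [heappop_length, hlen1]
          omega
        match l, hiff.mp hcond with
        | l0 :: l1 :: t, _ =>
          have hl0 : pvGet (l0 :: l1 :: t) 0 = l0 := by simp [pvGet]
          have hl1 : pvGet (l0 :: l1 :: t) 1 = l1 := by simp [pvGet]
          have he1 : (heappop h).1 = l0 := by rw [e1, heads, hl0]
          have perm1 : (heappop h).2.Perm (l1 :: t) := by
            have := (hp1.symm.trans hp)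
            rw [he1] at this
            exact this.cons_inv
          have ht : (l1 :: t).Pairwise (· ≤ ·) := hs.of_cons
          have he2 : (heappop (heappop h).2).1 = l1 := by
            rw [e2, min_unique _ _ perm1 hne1 (heap_head_le _ hH1) (sorted_head_le _ ht)]
            simp [pvGet]
          have perm2 : (heappop (heappop h).2).2.Perm t := by
            have := (hp2.symm.trans perm1)
            rw [he2] at this
            exact this.cons_inv
          obtain ⟨hH3, hp3⟩ := heappush_spec (heappop (heappop h).2).2
            ((heappop h).1 + (heappop (heappop h).2).1 * 2) hH2
          have hpush_len := heappush_length (heappop (heappop h).2).2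
            ((heappop h).1 + (heappop (heappop h).2).1 * 2)
          have hceq : (heappop h).1 + (heappop (heappop h).2).1 * 2
              = pvGet (l0 :: l1 :: t) 0 + 2 * pvGet (l0 :: l1 :: t) 1 := by
            rw [he1, he2, hl0, hl1]
            ring
          have hdrop : (l0 :: l1 :: t).drop 2 = t := by simp
          have hpermAB : (heappush (heappop (heappop h).2).2
              ((heappop h).1 + (heappop (heappop h).2).1 * 2)).Perm
              ((((l0 :: l1 :: t).drop 2).insertIdx
                (insPos ((l0 :: l1 :: t).drop 2)
                  (pvGet (l0 :: l1 :: t) 0 + 2 * pvGet (l0 :: l1 :: t) 1))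
                (pvGet (l0 :: l1 :: t) 0 + 2 * pvGet (l0 :: l1 :: t) 1))) := by
            rw [hdrop, ← hceq]
            exact (hp3.trans (perm2.cons _)).trans (insort_perm t _).symm
          have hlenA : (heappush (heappop (heappop h).2).2
              ((heappop h).1 + (heappop (heappop h).2).1 * 2)).length ≤ fa := by
            rw [hpush_len, hlen2]
            omega
          have hnewne : (heappush (heappop (heappop h).2).2
              ((heappop h).1 + (heappop (heappop h).2).1 * 2)) ≠ [] := by
            intro e
            rw [e] at hlenA
            have := hpush_len
            rw [e] at this
            simp at this
          have hlenB : ((((l0 :: l1 :: t).drop 2).insertIdx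
              (insPos ((l0 :: l1 :: t).drop 2)
                (pvGet (l0 :: l1 :: t) 0 + 2 * pvGet (l0 :: l1 :: t) 1))
              (pvGet (l0 :: l1 :: t) 0 + 2 * pvGet (l0 :: l1 :: t) 1))).length ≤ fb := by
            rw [List.length_insertIdx, if_pos (insPos_le _ _), hdrop]
            simp only [List.length_cons] at hfb ⊢
            omega
          have hnewpw := insort_pairwise
            (pvGet (l0 :: l1 :: t) 0 + 2 * pvGet (l0 :: l1 :: t) 1)
            ((l0 :: l1 :: t).drop 2) (by rw [hdrop]; exact ht.of_cons)
          exact ih fb _ _ (ans + 1) hlenA hlenB hH3 hnewpw hpermAB hnewne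
    · rw [loopA_exit _ _ _ _ hcond, loopB_exit _ _ _ _ (fun hc => hcond (hiff.mpr hc))]
      exact ⟨rfl, hp, hH, hs, hne⟩

-- ===== VERDICT (by name: the statement is the Claim_ definition above) =====
theorem solution_spec : Claim_equal_solution := by
  intro scoville K _ hpre
  unfold Spec_solution solution solution_alt
  obtain ⟨hperm, hheap⟩ := heapify_spec scoville
  have hsortp : (PySem.List.sorted scoville (fun x => x) false).Perm scoville :=
    PySem.List.sorted_perm scoville (fun x => x) false
  have hsortpw : (PySem.List.sorted scoville (fun x => x) false).Pairwise (· ≤ ·) :=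
    PySem.List.sorted_pairwise scoville (fun x => x)
  have hne : heapify scoville ≠ [] := by
    intro e
    exact hpre ((e ▸ hperm : ([] : List Int).Perm scoville).symm.eq_nil)
  obtain ⟨hans, hperm2, hH2, hs2, hne2⟩ :=
    loop_eq K (heapify scoville).length (PySem.List.sorted scoville (fun x => x) false).length
      (heapify scoville) (PySem.List.sorted scoville (fun x => x) false) 0
      (le_refl _) (le_refl _) hheap hsortpw (hperm.trans hsortp.symm) hne
  have heads : pvGet (loopA (heapify scoville).length K (heapify scoville) 0).2 0
      = pvGet (loopB (PySem.List.sorted scoville (fun x => x) false).length K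
          (PySem.List.sorted scoville (fun x => x) false) 0).2 0 :=
    min_unique _ _ hperm2 hne2 (heap_head_le _ hH2) (sorted_head_le _ hs2)
  rw [heads, hans]
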